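-- pv_equiv track=rewrite | github.com/ZizhuangCui/Provisional-database | replace_repeated_chars.py | replace_repeated_chars
-- ===== SOURCE A (Python) =====
-- def replace_repeated_chars(s: str, k: int) -> str:
--     # Initialize an empty list to hold the result characters
--     result = []
--     # Use a set to keep track of the characters seen in the last k characters
--     seen = set()
--     # Use a queue to keep track of the order of the last k characters seen
--     queue = []
--
--     for char in s:
--         # If the character has been seen in the last k characters, replace it with '-'
--         if char in seen:
--             result.append('-')
--         else:
--             result.append(char)
--             seen.add(char)
--             queue.append(char)
--             # If the queue length exceeds k, remove the oldest character from seen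
--             if len(queue) > k:
--                 removed_char = queue.pop(0)
--                 seen.remove(removed_char)
--
--     return ''.join(result)
-- ===== SOURCE B (Python) =====
-- def replace_repeated_chars(s: str, k: int) -> str:
--     # One dict of acceptance indices replaces A's set + FIFO queue + eviction loop.
--     result = []
--     c = 0           # number of accepted (non-replaced) characters so far
--     last = {}       # char -> value of c just after that char was last accepted
--     for ch in s:
--         v = last.get(ch)
--         if v is not None and v > c - k:
--             result.append('-')
--         else:
--             c += 1
--             last[ch] = c
--             result.append(ch)
--     return ''.join(result)
-- ===== Notes on version B (the rewrite author's own statement) =====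
-- stated objective: alternative
-- what changed: Replaces A's seen-set + FIFO queue + eviction loop with a single dict mapping each char to its acceptance index and a boundary comparison against the count of accepted chars, so nothing is ever evicted.
import Mathlib
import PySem

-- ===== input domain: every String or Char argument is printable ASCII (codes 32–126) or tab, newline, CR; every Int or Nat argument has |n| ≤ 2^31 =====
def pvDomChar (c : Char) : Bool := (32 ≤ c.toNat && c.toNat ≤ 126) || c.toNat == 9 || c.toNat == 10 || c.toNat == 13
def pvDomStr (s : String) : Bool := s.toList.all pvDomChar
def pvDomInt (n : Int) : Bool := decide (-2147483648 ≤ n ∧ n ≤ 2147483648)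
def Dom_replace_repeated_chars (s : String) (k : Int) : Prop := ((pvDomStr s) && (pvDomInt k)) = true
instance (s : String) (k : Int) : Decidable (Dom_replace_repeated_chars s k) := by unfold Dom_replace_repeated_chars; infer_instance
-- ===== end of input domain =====

-- B replaces A's set + FIFO queue + eviction with one dict of acceptance indices and a
-- boundary comparison (objective: alternative; same O(n) cost, no eviction bookkeeping).


-- ===== PORT A =====
-- one loop iteration of A: (result, seen, queue) and the current char
def repStepA (k : Int) (st : List Char × PySem.Set Char × List Char) (ch : Char) :
    List Char × PySem.Set Char × List Char :=
  if PySem.Set.contains st.2.1 ch then (st.1 ++ ['-'], st.2.1, st.2.2)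
  else
    let res := st.1 ++ [ch]
    let seen := PySem.Set.add st.2.1 ch
    let queue := st.2.2 ++ [ch]
    if (queue.length : Int) > k then
      -- queue.pop(0); seen.remove(removed): both always succeed here (queue just got an
      -- element appended and it is in seen), so the `none`/`getD` fallbacks are unreachable
      match PySem.List.pop? queue 0 with
      | some (removed, rest) => (res, (PySem.Set.remove? seen removed).getD seen, rest)
      | none => (res, seen, queue)
    else (res, seen, queue)

def replace_repeated_chars (s : String) (k : Int) : String :=
  String.ofList (s.toList.foldl (repStepA k)
    (([] : List Char), (PySem.Set.empty : PySem.Set Char), ([] : List Char))).1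

-- ===== PORT B =====
-- one loop iteration of B: (result, c, last) and the current char
def repStepB (k : Int) (st : List Char × Int × PySem.Dict Char Int) (ch : Char) :
    List Char × Int × PySem.Dict Char Int :=
  if (match PySem.Dict.get? st.2.2 ch with
      | some v => decide (st.2.1 - k < v)
      | none => false) then
    (st.1 ++ ['-'], st.2.1, st.2.2)
  else
    (st.1 ++ [ch], st.2.1 + 1, PySem.Dict.insert st.2.2 ch (st.2.1 + 1))

def replace_repeated_chars_alt (s : String) (k : Int) : String :=
  String.ofList (s.toList.foldl (repStepB k)
    (([] : List Char), (0 : Int), (PySem.Dict.empty : PySem.Dict Char Int))).1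

-- ===== PRECONDITION & SPEC =====
def Spec_replace_repeated_chars (s : String) (k : Int) (out : String) : Prop := out = replace_repeated_chars_alt s k
instance (s : String) (k : Int) (out : String) : Decidable (Spec_replace_repeated_chars s k out) := by unfold Spec_replace_repeated_chars; infer_instance

-- ===== CLAIM (what is proved, stated in full; the proofs are below) =====
def Claim_equal_replace_repeated_chars : Prop := ∀ (s : String) (k : Int), Dom_replace_repeated_chars s k → Spec_replace_repeated_chars s k (replace_repeated_chars s k)

-- ===== LEMMAS AND PROOFS =====

-- number of accepted chars already evicted from A's window, as a function of k and c
def qm (k c : Int) : Int := max (c - max k 0) 0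

-- coupling invariant between A's state (seen, queue) and B's state (c, last)
def RepInv (k : Int) (seen : PySem.Set Char) (queue : List Char) (c : Int)
    (last : PySem.Dict Char Int) : Prop :=
  0 ≤ c ∧
  (queue.length : Int) = c - qm k c ∧
  (∀ (i : Nat) (h : i < queue.length), last.get? queue[i] = some (qm k c + 1 + (i : Int))) ∧
  (∀ z v, last.get? z = some v → 1 ≤ v ∧ v ≤ c) ∧
  (∀ z v, last.get? z = some v → qm k c < v → z ∈ queue) ∧
  (∀ z : Char, z ∈ seen ↔ z ∈ queue)

lemma qm_lt_iff {k c v : Int} (hc : 0 ≤ c) (h1 : 1 ≤ v) (h2 : v ≤ c) :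
    qm k c < v ↔ c - k < v := by unfold qm; omega

-- A's membership test and B's dict test agree under the invariant
lemma mem_test {k : Int} {seen : PySem.Set Char} {queue : List Char} {c : Int}
    {last : PySem.Dict Char Int} (hinv : RepInv k seen queue c last) (ch : Char) :
    ch ∈ seen ↔ ∃ v, last.get? ch = some v ∧ c - k < v := by
  obtain ⟨hc, -, hidx, hbnd, hcmpl, hmem⟩ := hinv
  rw [hmem]
  constructor
  · intro h
    obtain ⟨i, hi, rfl⟩ := List.mem_iff_getElem.mp h
    refine ⟨qm k c + 1 + (i : Int), hidx i hi, ?_⟩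
    have hb := hbnd _ _ (hidx i hi)
    exact (qm_lt_iff hc hb.1 hb.2).mp (by omega)
  · rintro ⟨v, hv, hlt⟩
    have hb := hbnd _ _ hv
    exact hcmpl _ _ hv ((qm_lt_iff hc hb.1 hb.2).mpr hlt)

lemma repFold_eq (k : Int) : ∀ (l : List Char) (res : List Char) (seen : PySem.Set Char)
    (queue : List Char) (c : Int) (last : PySem.Dict Char Int),
    RepInv k seen queue c last →
    (l.foldl (repStepA k) (res, seen, queue)).1 = (l.foldl (repStepB k) (res, c, last)).1 := by
  intro l
  induction l with
  | nil => intro _ _ _ _ _ _; rfl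
  | cons ch l ih =>
    intro res seen queue c last hinv
    have htest := mem_test hinv ch
    obtain ⟨hc, hlen, hidx, hbnd, hcmpl, hmem⟩ := hinv
    by_cases hch : ch ∈ seen
    · -- both output '-', states unchanged
      obtain ⟨v, hv, hlt⟩ := htest.mp hch
      have hA : repStepA k (res, seen, queue) ch = (res ++ ['-'], seen, queue) := by
        simp only [repStepA]
        rw [if_pos ((PySem.Set.contains_iff seen ch).mpr hch)]
      have hB : repStepB k (res, c, last) ch = (res ++ ['-'], c, last) := by
        simp [repStepB, hv, hlt]
      rw [List.foldl_cons, List.foldl_cons, hA, hB]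
      exact ih _ _ _ _ _ ⟨hc, hlen, hidx, hbnd, hcmpl, hmem⟩
    · -- both accept ch
      have hchq : ch ∉ queue := fun h => hch (hmem ch |>.mpr h)
      have hBtest : (match PySem.Dict.get? last ch with
          | some v => decide (c - k < v) | none => false) = false := by
        cases hv : PySem.Dict.get? last ch with
        | none => simp
        | some v =>
          simp only [decide_eq_false_iff_not]
          exact fun hlt => hch (htest.mpr ⟨v, hv, hlt⟩)
      have hB : repStepB k (res, c, last) ch
          = (res ++ [ch], c + 1, PySem.Dict.insert last ch (c + 1)) := by
        simp [repStepB, hBtest]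
      have hAcont : PySem.Set.contains seen ch = false := by
        by_contra h
        exact hch ((PySem.Set.contains_iff seen ch).mp (by simpa using h))
      -- facts about the new dict
      have hget' : ∀ z, (PySem.Dict.insert last ch (c+1)).get? z
          = if z = ch then some (c+1) else last.get? z := fun z =>
        PySem.Dict.get?_insert last ch z (c+1)
      have hbnd' : ∀ z v, (PySem.Dict.insert last ch (c+1)).get? z = some v →
          1 ≤ v ∧ v ≤ c + 1 := by
        intro z v hz
        rw [hget'] at hz
        by_cases hzc : z = ch
        · simp [hzc] at hz; omega
        · simp [hzc] at hz
          have := hbnd _ _ hz; omega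
      rw [List.foldl_cons, List.foldl_cons, hB]
      by_cases hpop : ((queue ++ [ch]).length : Int) > k
      · -- eviction happens
        cases hq : queue with
        | nil =>
          -- k ≤ 0 : the just-added char is evicted immediately
          subst hq
          have hk0 : k ≤ 0 := by simp at hpop; omega
          have hA : repStepA k (res, seen, []) ch
              = (res ++ [ch], PySem.Set.discard (PySem.Set.add seen ch) ch, []) := by
            simp only [repStepA, List.nil_append]
            rw [if_neg (by rw [hAcont]; exact Bool.false_ne_true), if_pos (by simpa using hpop)]
            simp only [PySem.List.pop?_zero_cons,
              PySem.Set.remove?_of_mem ((PySem.Set.mem_add seen ch ch).mpr (Or.inr rfl)),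
              Option.getD_some]
          rw [hA]
          apply ih
          refine ⟨by omega, by simp [qm]; omega, by simp, hbnd', ?_, ?_⟩
          · intro z v hz hgt
            have := hbnd' _ _ hz
            have : qm k (c+1) = c + 1 := by unfold qm; omega
            omega
          · intro z
            simp only [PySem.Set.mem_discard, PySem.Set.mem_add, List.not_mem_nil, iff_false]
            rintro ⟨h1 | h1, h2⟩
            · exact absurd ((hmem z).mp h1) (List.not_mem_nil)
            · exact h2 h1
        | cons q0 qt =>
          -- window full: evict the oldest accepted char q0
          subst hq
          have hq0mem : q0 ∈ q0 :: qt := List.mem_cons_self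
          have hq0seen : q0 ∈ seen := (hmem q0).mpr hq0mem
          have hA : repStepA k (res, seen, q0 :: qt) ch
              = (res ++ [ch], PySem.Set.discard (PySem.Set.add seen ch) q0, qt ++ [ch]) := by
            simp only [repStepA]
            rw [if_neg (by rw [hAcont]; exact Bool.false_ne_true), if_pos hpop,
              List.cons_append]
            simp only [PySem.List.pop?_zero_cons,
              PySem.Set.remove?_of_mem ((PySem.Set.mem_add seen ch q0).mpr (Or.inl hq0seen)),
              Option.getD_some]
          rw [hA]
          -- arithmetic facts: the window was exactly full
          have hfull : c - qm k c = k := by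
            simp only [List.length_append, List.length_cons, List.length_nil] at hpop
            simp only [List.length_cons] at hlen
            unfold qm at *; push_cast at hpop; omega
          have hm' : qm k (c+1) = qm k c + 1 := by unfold qm at *; omega
          have hchq' : ch ∉ q0 :: qt := hchq
          apply ih
          refine ⟨by omega, ?_, ?_, hbnd', ?_, ?_⟩
          · -- length
            simp only [List.length_append, List.length_cons, List.length_nil] at hlen ⊢
            push_cast at hlen ⊢; omega
          · -- indices
            intro i h
            simp only [List.length_append, List.length_cons, List.length_nil] at h
            by_cases hi : i < qt.length
            · rw [List.getElem_append_left hi, hget']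
              have hne : qt[i] ≠ ch := fun he => hchq' (by
                rw [← he]; exact List.mem_cons_of_mem _ (List.getElem_mem _))
              rw [if_neg hne]
              have := hidx (i+1) (by simpa using Nat.succ_lt_succ hi)
              simp only [List.getElem_cons_succ] at this
              rw [this]
              congr 1; rw [hm']; push_cast; ring
            · have hie : i = qt.length := by omega
              subst hie
              rw [List.getElem_append_right (le_refl _)]
              simp only [Nat.sub_self, List.getElem_cons_zero, hget']
              rw [if_pos trivial]
              congr 1
              simp only [List.length_cons] at hlen
              push_cast at hlen ⊢; omega
          · -- completeness
            intro z v hz hgt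
            rw [hget'] at hz
            by_cases hzc : z = ch
            · subst hzc; exact List.mem_append_right _ List.mem_cons_self
            · rw [if_neg hzc] at hz
              have hzq : z ∈ q0 :: qt := hcmpl _ _ hz (by omega)
              rcases List.mem_cons.mp hzq with h0 | ht
              · exfalso
                subst h0
                have h00 := hidx 0 (by simp)
                simp only [List.getElem_cons_zero] at h00
                rw [h00] at hz
                have : v = qm k c + 1 := by injection hz with h; omega
                omega
              · exact List.mem_append_left _ ht
          · -- membership
            intro z
            simp only [PySem.Set.mem_discard, PySem.Set.mem_add, List.mem_append,
              List.mem_singleton]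
            constructor
            · rintro ⟨h1 | h1, h2⟩
              · have hzq := (hmem z).mp h1
                rcases List.mem_cons.mp hzq with h0 | ht
                · exact absurd h0 h2
                · exact Or.inl ht
              · exact Or.inr h1
            · rintro (ht | rfl)
              · have hzq : z ∈ q0 :: qt := List.mem_cons_of_mem _ ht
                refine ⟨Or.inl ((hmem z).mpr hzq), ?_⟩
                -- z ≠ q0 : their dict values differ
                obtain ⟨i, hi, rfl⟩ := List.mem_iff_getElem.mp ht
                intro he
                have h1 := hidx 0 (by simp)
                have h2 := hidx (i+1) (by simpa using Nat.succ_lt_succ hi)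
                simp only [List.getElem_cons_zero, List.getElem_cons_succ] at h1 h2
                rw [he, h1] at h2
                injection h2 with h3; omega
              · exact ⟨Or.inr rfl, fun he => hchq' (he ▸ List.mem_cons_self)⟩
      · -- no eviction
        have hA : repStepA k (res, seen, queue) ch
            = (res ++ [ch], PySem.Set.add seen ch, queue ++ [ch]) := by
          simp only [repStepA]
          rw [if_neg (by rw [hAcont]; exact Bool.false_ne_true), if_neg hpop]
        rw [hA]
        obtain ⟨hm01, hm02⟩ : qm k c = 0 ∧ qm k (c+1) = 0 := by
          simp only [not_lt, List.length_append, List.length_cons, List.length_nil] at hpop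
          unfold qm at *
          push_cast at hpop
          omega
        apply ih
        refine ⟨by omega, ?_, ?_, hbnd', ?_, ?_⟩
        · simp only [List.length_append, List.length_cons, List.length_nil]
          push_cast; omega
        · intro i h
          simp only [List.length_append, List.length_cons, List.length_nil] at h
          by_cases hi : i < queue.length
          · rw [List.getElem_append_left hi, hget']
            have hne : queue[i] ≠ ch := fun he => hchq (he ▸ List.getElem_mem _)
            rw [if_neg hne, hidx i hi]
            congr 1; omega
          · have hie : i = queue.length := by omega
            subst hie
            rw [List.getElem_append_right (le_refl _)]
            simp only [Nat.sub_self, List.getElem_cons_zero, hget']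
            rw [if_pos trivial]
            congr 1
            omega
        · intro z v hz hgt
          rw [hget'] at hz
          by_cases hzc : z = ch
          · subst hzc; exact List.mem_append_right _ List.mem_cons_self
          · rw [if_neg hzc] at hz
            exact List.mem_append_left _ (hcmpl _ _ hz (by omega))
        · intro z
          rw [PySem.Set.mem_add]
          simp only [List.mem_append, List.mem_singleton, hmem]

lemma repInv_init (k : Int) : RepInv k PySem.Set.empty [] 0 PySem.Dict.empty := by
  refine ⟨le_refl _, by simp [qm], by simp, ?_, ?_, by simp [PySem.Set.empty]⟩
  · intro z v hz; rw [PySem.Dict.get?_empty] at hz; cases hz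
  · intro z v hz; rw [PySem.Dict.get?_empty] at hz; cases hz

-- ===== VERDICT (by name: the statement is the Claim_ definition above) =====
theorem replace_repeated_chars_spec : Claim_equal_replace_repeated_chars := by
  intro s k _
  unfold Spec_replace_repeated_chars replace_repeated_chars replace_repeated_chars_alt
  rw [repFold_eq k s.toList [] PySem.Set.empty [] 0 PySem.Dict.empty (repInv_init k)]
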